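-- pv_equiv track=rewrite | github.com/AlekseySapi/python | text_shuffle.py | text_shuffle
-- ===== SOURCE A (Python) =====
-- def text_shuffle(text):
-- 	chars = []
-- 	temp1 = []
-- 	temp2 = []
-- 	i = 2
-- 	for char in text:
-- 		if i % 2 == 0:
-- 			temp1.append(char)
-- 		elif i % 3 == 0:
-- 			temp2.append(char)
-- 		else:
-- 			chars.append(char)
-- 		i += 1
-- 	for char in temp1:
-- 		chars.append(char)
-- 	for char in temp2:
-- 		chars.append(char)
-- 	return ''.join(chars)
-- ===== SOURCE B (Python) =====
-- def text_shuffle(text):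
--     # Period-6 block algorithm: characters land in the three output buckets in a
--     # fixed pattern repeating every 6 positions, so process whole blocks of 6 at
--     # once with hard-wired placements and finish the (< 6 chars) tail explicitly.
--     rest, even, div3 = [], [], []
--     t = text
--     while len(t) >= 6:
--         rest += [t[3], t[5]]
--         even += [t[0], t[2], t[4]]
--         div3 += [t[1]]
--         t = t[6:]
--     n = len(t)
--     if n >= 1: even.append(t[0])
--     if n >= 2: div3.append(t[1])
--     if n >= 3: even.append(t[2])
--     if n >= 4: rest.append(t[3])
--     if n >= 5: even.append(t[4])
--     return ''.join(rest + even + div3)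
-- ===== Notes on version B (the rewrite author's own statement) =====
-- stated objective: alternative
-- what changed: Replaces A's per-character counter with modulo tests by a period-6 block algorithm: the bucket pattern repeats every 6 positions, so B consumes blocks of 6 characters with hard-wired placements (no counter, no divisibility tests) and handles the <6-character tail explicitly.
import Mathlib
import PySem

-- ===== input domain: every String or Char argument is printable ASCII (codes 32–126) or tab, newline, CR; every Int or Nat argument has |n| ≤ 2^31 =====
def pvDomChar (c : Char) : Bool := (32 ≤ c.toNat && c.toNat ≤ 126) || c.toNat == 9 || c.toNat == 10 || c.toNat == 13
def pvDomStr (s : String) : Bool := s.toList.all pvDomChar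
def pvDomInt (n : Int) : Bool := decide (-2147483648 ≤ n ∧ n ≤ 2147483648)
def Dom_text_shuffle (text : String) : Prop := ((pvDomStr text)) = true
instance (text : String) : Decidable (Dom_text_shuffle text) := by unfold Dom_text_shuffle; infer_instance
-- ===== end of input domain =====

-- B replaces A's per-character counter with divisibility tests by a period-6 block algorithm
-- (blocks of 6 chars with hard-wired bucket placements, explicit tail); objective: alternative, same O(n).


-- ===== PORT A =====
-- the body of A's 'for char in text' loop (state: chars, temp1, temp2, i)
def pvStep (st : List Char × List Char × List Char × Int) (char : Char) :
    List Char × List Char × List Char × Int :=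
  let chars := st.1
  let temp1 := st.2.1
  let temp2 := st.2.2.1
  let i := st.2.2.2
  if PySem.Int.mod i 2 = 0 then (chars, temp1 ++ [char], temp2, i + 1)
  else if PySem.Int.mod i 3 = 0 then (chars, temp1, temp2 ++ [char], i + 1)
  else (chars ++ [char], temp1, temp2, i + 1)

def text_shuffle (text : String) : String :=
  let r := text.toList.foldl pvStep ([], [], [], 2)
  String.mk (r.1 ++ r.2.1 ++ r.2.2.1)

-- ===== PORT B =====
-- the loop of Source B: consume blocks of 6 chars, then the explicit if-chain on the < 6 char tail
def pvAltLoop : List Char → List Char × List Char × List Char → List Char × List Char × List Char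
  | c0 :: c1 :: c2 :: c3 :: c4 :: c5 :: t, (rest, even, div3) =>
      pvAltLoop t (rest ++ [c3, c5], even ++ [c0, c2, c4], div3 ++ [c1])
  | t, (rest, even, div3) =>
      let n := t.length
      let even := if 1 ≤ n then even ++ [t.getD 0 ' '] else even
      let div3 := if 2 ≤ n then div3 ++ [t.getD 1 ' '] else div3
      let even := if 3 ≤ n then even ++ [t.getD 2 ' '] else even
      let rest := if 4 ≤ n then rest ++ [t.getD 3 ' '] else rest
      let even := if 5 ≤ n then even ++ [t.getD 4 ' '] else even
      (rest, even, div3)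

def text_shuffle_alt (text : String) : String :=
  let r := pvAltLoop text.toList ([], [], [])
  String.mk (r.1 ++ r.2.1 ++ r.2.2)

-- ===== PRECONDITION & SPEC =====
def Spec_text_shuffle (text : String) (out : String) : Prop := out = text_shuffle_alt text
instance (text : String) (out : String) : Decidable (Spec_text_shuffle text out) := by unfold Spec_text_shuffle; infer_instance

-- ===== CLAIM (what is proved, stated in full; the proofs are below) =====
def Claim_equal_text_shuffle : Prop := ∀ (text : String), Dom_text_shuffle text → Spec_text_shuffle text (text_shuffle text)

-- ===== LEMMAS AND PROOFS =====
theorem pv_step_even (c t1 t2 : List Char) (j : Int) (ch : Char) (h : j % 2 = 0) :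
    pvStep (c, t1, t2, j) ch = (c, t1 ++ [ch], t2, j + 1) := by
  simp [pvStep, h]

theorem pv_step_div3 (c t1 t2 : List Char) (j : Int) (ch : Char) (h2 : j % 2 = 1) (h3 : j % 3 = 0) :
    pvStep (c, t1, t2, j) ch = (c, t1, t2 ++ [ch], j + 1) := by
  simp [pvStep, h2, h3]

theorem pv_step_rest (c t1 t2 : List Char) (j : Int) (ch : Char) (h2 : j % 2 = 1) (h3 : j % 3 ≠ 0) :
    pvStep (c, t1, t2, j) ch = (c ++ [ch], t1, t2, j + 1) := by
  simp [pvStep, h2, h3]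

theorem pv_loop_eq (xs : List Char) (acc : List Char × List Char × List Char) :
    ∀ (i : Int), i % 6 = 2 →
    xs.foldl pvStep (acc.1, acc.2.1, acc.2.2, i)
    = ((pvAltLoop xs acc).1, (pvAltLoop xs acc).2.1, (pvAltLoop xs acc).2.2, i + xs.length) := by
  induction xs, acc using pvAltLoop.induct with
  | case1 c0 c1 c2 c3 c4 c5 t rest even div3 ih =>
      intro i hi
      rw [List.foldl_cons, pv_step_even _ _ _ _ _ (by omega),
          List.foldl_cons, pv_step_div3 _ _ _ _ _ (by omega) (by omega),
          List.foldl_cons, pv_step_even _ _ _ _ _ (by omega),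
          List.foldl_cons, pv_step_rest _ _ _ _ _ (by omega) (by omega),
          List.foldl_cons, pv_step_even _ _ _ _ _ (by omega),
          List.foldl_cons, pv_step_rest _ _ _ _ _ (by omega) (by omega)]
      have harith : i + 1 + 1 + 1 + 1 + 1 + 1 = i + 6 := by ring
      rw [harith]
      have h6 : (i + 6) % 6 = 2 := by omega
      have := ih (i + 6) h6
      simp only [List.append_assoc, List.cons_append, List.nil_append] at this ⊢
      rw [this]
      simp only [pvAltLoop, List.length_cons, Prod.mk.injEq]
      push_cast
      refine ⟨trivial, trivial, trivial, by omega⟩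
  | case2 t rest even div3 hne =>
      intro i hi
      rcases t with _ | ⟨a, _ | ⟨b, _ | ⟨c, _ | ⟨d, _ | ⟨e, _ | ⟨f, t⟩⟩⟩⟩⟩⟩
      · simp [pvAltLoop]
      · rw [List.foldl_cons, pv_step_even _ _ _ _ _ (by omega), List.foldl_nil]
        simp [pvAltLoop]
      · rw [List.foldl_cons, pv_step_even _ _ _ _ _ (by omega),
            List.foldl_cons, pv_step_div3 _ _ _ _ _ (by omega) (by omega), List.foldl_nil]
        simp [pvAltLoop]
        omega
      · rw [List.foldl_cons, pv_step_even _ _ _ _ _ (by omega),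
            List.foldl_cons, pv_step_div3 _ _ _ _ _ (by omega) (by omega),
            List.foldl_cons, pv_step_even _ _ _ _ _ (by omega), List.foldl_nil]
        simp [pvAltLoop, List.append_assoc]
        omega
      · rw [List.foldl_cons, pv_step_even _ _ _ _ _ (by omega),
            List.foldl_cons, pv_step_div3 _ _ _ _ _ (by omega) (by omega),
            List.foldl_cons, pv_step_even _ _ _ _ _ (by omega),
            List.foldl_cons, pv_step_rest _ _ _ _ _ (by omega) (by omega), List.foldl_nil]
        simp [pvAltLoop, List.append_assoc]
        omega
      · rw [List.foldl_cons, pv_step_even _ _ _ _ _ (by omega),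
            List.foldl_cons, pv_step_div3 _ _ _ _ _ (by omega) (by omega),
            List.foldl_cons, pv_step_even _ _ _ _ _ (by omega),
            List.foldl_cons, pv_step_rest _ _ _ _ _ (by omega) (by omega),
            List.foldl_cons, pv_step_even _ _ _ _ _ (by omega), List.foldl_nil]
        simp [pvAltLoop, List.append_assoc]
        omega
      · exact (hne a b c d e f t rfl).elim

-- ===== VERDICT (by name: the statement is the Claim_ definition above) =====
theorem text_shuffle_spec : Claim_equal_text_shuffle := by
  intro text _
  unfold Spec_text_shuffle text_shuffle text_shuffle_alt
  have h := pv_loop_eq text.toList ([], [], []) 2 (by decide)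
  simp only at h
  rw [h]
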